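-- pv_equiv track=rewrite | github.com/aboutcode-org/scancode-toolkit | src/packagedcode/xmlutils.py | namespace_unaware
-- ===== SOURCE A (Python) =====
-- def namespace_unaware(xpath):
--     """
--     Return a new namespace-unaware xpath expression accepting any namespace
--     given a simple xpath expression using only single slashes.
--
--     This is achieved by wrapping each step of an expression with the local-
--     name() XPath function. XPath expressions with namespaced XML can be complex
--     and hard to read and write: this helps keep expression simple when
--     namespaces do not matter.
--
--     Use with caution: this works only for simple expression using only single /.
--
--     For example:
--     >>> simple_xpath = '/project/organization/url'
--     >>> namespace_unaware(simple_xpath)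
--     "/*[local-name()='project']/*[local-name()='organization']/*[local-name()='url']"
--
--     """
--     # Search * and then a local-name in the returned elements
--     ignore_namespace = "*[local-name()='%s']"
--     new_steps = []
--     # we assume that the input expression is simple using only /
--     for step in xpath.split('/'):
--         if step:
--             new_steps.append(ignore_namespace % step)
--         else:
--             new_steps.append(step)
--     return '/'.join(new_steps)
-- ===== SOURCE B (Python) =====
-- def namespace_unaware(xpath):
--     """
--     Return a new namespace-unaware xpath expression accepting any namespace
--     given a simple xpath expression using only single slashes.
--
--     Single left-to-right scan: copy slashes through, and wrap each maximal
--     run of non-slash characters in the local-name() test, building the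
--     output in one pass (no split/rejoin).
--     """
--     out = []
--     i, n = 0, len(xpath)
--     while i < n:
--         if xpath[i] == '/':
--             out.append('/')
--             i += 1
--         else:
--             j = i
--             while j < n and xpath[j] != '/':
--                 j += 1
--             out.append("*[local-name()='%s']" % xpath[i:j])
--             i = j
--     return ''.join(out)
-- ===== Notes on version B (the rewrite author's own statement) =====
-- stated objective: alternative
-- what changed: Replaces split-on-'/'/transform/rejoin with a single left-to-right scan that copies slashes and wraps each maximal run of non-slash characters in place.
import Mathlib
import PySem

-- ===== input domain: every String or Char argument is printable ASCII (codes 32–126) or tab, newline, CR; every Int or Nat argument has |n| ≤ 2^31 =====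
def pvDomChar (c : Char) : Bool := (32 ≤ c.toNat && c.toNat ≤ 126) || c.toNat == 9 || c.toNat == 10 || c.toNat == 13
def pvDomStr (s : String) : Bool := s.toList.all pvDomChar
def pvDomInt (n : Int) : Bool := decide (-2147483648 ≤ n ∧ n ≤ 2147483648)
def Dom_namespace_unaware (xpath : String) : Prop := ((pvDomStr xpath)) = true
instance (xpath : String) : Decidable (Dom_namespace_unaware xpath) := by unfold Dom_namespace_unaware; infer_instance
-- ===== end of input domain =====

-- B replaces A's split-on-'/' / transform / rejoin with one left-to-right scan that
-- copies slashes and wraps each maximal non-slash run (alternative, same cost).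

-- ===== PORT A =====
-- ignore_namespace % step
def nuWrap (step : List Char) : List Char :=
  "*[local-name()='".toList ++ step ++ "']".toList

def namespace_unaware (xpath : String) : String :=
  let steps := PySem.Chars.splitOn xpath.toList ['/']
  let newSteps := steps.foldl
    (fun acc step => acc ++ [if step ≠ [] then nuWrap step else step])
    ([] : List (List Char))
  String.ofList (PySem.Chars.join ['/'] newSteps)

-- ===== PORT B =====
-- hand port of Source B's scanner: copy a slash through, or consume (takeWhile) the maximal
-- non-slash run xpath[i:j], wrap it, and continue after it (dropWhile); exact step for step
def nuScan : List Char → List Char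
  | [] => []
  | c :: rest =>
    if c = '/' then '/' :: nuScan rest
    else nuWrap ((c :: rest).takeWhile (· ≠ '/')) ++
         nuScan ((c :: rest).dropWhile (· ≠ '/'))
termination_by cs => cs.length
decreasing_by
  · simp
  · rename_i hc
    rw [List.dropWhile_cons, if_pos (by simpa using hc)]
    simp only [List.length_cons]
    exact Nat.lt_succ_of_le (List.length_dropWhile_le _ _)

def namespace_unaware_alt (xpath : String) : String :=
  String.ofList (nuScan xpath.toList)

-- ===== PRECONDITION & SPEC =====
def Spec_namespace_unaware (xpath : String) (out : String) : Prop := out = namespace_unaware_alt xpath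
instance (xpath : String) (out : String) : Decidable (Spec_namespace_unaware xpath out) := by unfold Spec_namespace_unaware; infer_instance

-- ===== CLAIM (what is proved, stated in full; the proofs are below) =====
def Claim_equal_namespace_unaware : Prop := ∀ (xpath : String), Dom_namespace_unaware xpath → Spec_namespace_unaware xpath (namespace_unaware xpath)

-- ===== LEMMAS AND PROOFS =====

-- clean characterisation of splitOn on the single-char separator '/'
def splitF : List Char → List (List Char)
  | [] => [[]]
  | c :: rest => if c = '/' then [] :: splitF rest else (splitF rest).modifyHead (c :: ·)

theorem splitF_ne_nil (cs : List Char) : splitF cs ≠ [] := by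
  cases cs with
  | nil => simp [splitF]
  | cons c rest =>
    simp only [splitF]
    split
    · simp
    · cases h : splitF rest with
      | nil => exact absurd h (splitF_ne_nil rest)
      | cons y t => simp [List.modifyHead]

theorem nuScan_nil : nuScan [] = [] := by rw [nuScan.eq_def]

theorem nuScan_slash (rest : List Char) : nuScan ('/' :: rest) = '/' :: nuScan rest := by
  rw [nuScan.eq_def]; simp

theorem nuScan_nonslash (c : Char) (rest : List Char) (hc : c ≠ '/') :
    nuScan (c :: rest) =
      nuWrap ((c :: rest).takeWhile (· ≠ '/')) ++
        nuScan ((c :: rest).dropWhile (· ≠ '/')) := by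
  rw [nuScan.eq_def]; simp [hc]

-- first letter of a dropWhile-produced suffix fails the predicate
theorem nu_dropWhile_head (p : Char → Bool) : ∀ (l : List Char) (d0 : Char) (d' : List Char),
    l.dropWhile p = d0 :: d' → p d0 = false := by
  intro l
  induction l with
  | nil => intro d0 d' h; simp at h
  | cons a l ih =>
    intro d0 d' h
    rw [List.dropWhile_cons] at h
    split at h
    · exact ih _ _ h
    · cases h
      exact Bool.eq_false_iff.mpr ‹¬ _›

theorem nu_go_spec (fuel : Nat) : ∀ (l cur : List Char) (accl : List (List Char)),
    l.length ≤ fuel →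
    PySem.Chars.splitOn.go ['/'] fuel l cur accl =
      accl.reverse ++ (splitF l).modifyHead (cur.reverse ++ ·) := by
  induction fuel with
  | zero =>
    intro l cur accl h
    cases l with
    | cons c rest => simp at h
    | nil => simp [PySem.Chars.splitOn.go, splitF, List.modifyHead]
  | succ fuel ih =>
    intro l cur accl h
    cases l with
    | nil => simp [PySem.Chars.splitOn.go, splitF, List.modifyHead]
    | cons c rest =>
      by_cases hc : c = '/'
      · subst hc
        have hpre : List.isPrefixOf ['/'] ('/' :: rest) = true := by
          simp [List.isPrefixOf]
        simp only [PySem.Chars.splitOn.go, hpre, if_true, List.length_singleton,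
          List.drop_succ_cons, List.drop_zero]
        rw [ih rest [] (cur.reverse :: accl) (by simpa using Nat.le_of_succ_le_succ h)]
        cases hsf : splitF rest with
        | nil => exact absurd hsf (splitF_ne_nil rest)
        | cons y t => simp [splitF, hsf, List.modifyHead]
      · have hpre : List.isPrefixOf ['/'] (c :: rest) = false := by
          simp [List.isPrefixOf, Ne.symm hc]
        simp only [PySem.Chars.splitOn.go, hpre, Bool.false_eq_true, if_false]
        rw [ih rest (c :: cur) accl (by simpa using Nat.le_of_succ_le_succ h)]
        simp only [splitF, hc, if_false]
        cases hrest : splitF rest with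
        | nil => exact absurd hrest (splitF_ne_nil rest)
        | cons y t => simp [List.modifyHead]

theorem splitOn_eq_splitF (cs : List Char) :
    PySem.Chars.splitOn cs ['/'] = splitF cs := by
  unfold PySem.Chars.splitOn
  rw [nu_go_spec (cs.length + 1) cs [] [] (by omega)]
  cases h : splitF cs with
  | nil => exact absurd h (splitF_ne_nil cs)
  | cons y t => simp [List.modifyHead]

theorem splitF_no_slash (cs : List Char) (h : ∀ c ∈ cs, c ≠ '/') : splitF cs = [cs] := by
  induction cs with
  | nil => simp [splitF]
  | cons c rest ih =>
    have hc : c ≠ '/' := h c (by simp)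
    simp only [splitF, hc, if_false]
    rw [ih (fun x hx => h x (by simp [hx]))]
    simp [List.modifyHead]

theorem splitF_pre_slash (pre rest : List Char) (h : ∀ c ∈ pre, c ≠ '/') :
    splitF (pre ++ '/' :: rest) = pre :: splitF rest := by
  induction pre with
  | nil => simp [splitF]
  | cons c pre' ih =>
    have hc : c ≠ '/' := h c (by simp)
    simp only [List.cons_append, splitF, hc, if_false]
    rw [ih (fun x hx => h x (by simp [hx]))]
    simp [List.modifyHead]

-- the transformation A applies to each step
def nuStepF (step : List Char) : List Char := if step ≠ [] then nuWrap step else step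

theorem nu_main (n : Nat) : ∀ (cs : List Char), cs.length ≤ n →
    PySem.Chars.join ['/'] ((splitF cs).map nuStepF) = nuScan cs := by
  induction n with
  | zero =>
    intro cs h
    cases cs with
    | cons c rest => simp at h
    | nil => simp [splitF, nuStepF, PySem.Chars.join_singleton, nuScan_nil]
  | succ n ih =>
    intro cs h
    cases cs with
    | nil => simp [splitF, nuStepF, PySem.Chars.join_singleton, nuScan_nil]
    | cons c rest =>
      by_cases hc : c = '/'
      · subst hc
        simp only [splitF, if_true, List.map_cons]
        have hj : PySem.Chars.join ['/'] (nuStepF [] :: (splitF rest).map nuStepF) =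
            nuStepF [] ++ ['/'] ++ PySem.Chars.join ['/'] ((splitF rest).map nuStepF) := by
          obtain ⟨y, t, hyt⟩ := List.exists_cons_of_ne_nil (splitF_ne_nil rest)
          rw [hyt, List.map_cons]
          exact PySem.Chars.join_cons_cons _ _ _ _
        rw [hj, ih rest (by simpa using Nat.le_of_succ_le_succ h)]
        simp [nuStepF, nuScan_slash]
      · -- non-slash head: the maximal run
        rw [nuScan_nonslash c rest hc]
        have hrun : (c :: rest).takeWhile (· ≠ '/') =
            c :: rest.takeWhile (· ≠ '/') := by
          simp [hc]
        have hrunne : ∀ x ∈ (c :: rest).takeWhile (· ≠ '/'), x ≠ '/' := by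
          intro x hx
          simpa using List.mem_takeWhile_imp hx
        have hrunnil : (c :: rest).takeWhile (· ≠ '/') ≠ [] := by
          rw [hrun]; simp
        have hsplit : (c :: rest).takeWhile (· ≠ '/') ++ (c :: rest).dropWhile (· ≠ '/')
            = c :: rest := List.takeWhile_append_dropWhile
        cases hd : (c :: rest).dropWhile (· ≠ '/') with
        | nil =>
          have hcs : c :: rest = (c :: rest).takeWhile (· ≠ '/') := by
            conv_lhs => rw [← hsplit]
            rw [hd, List.append_nil]
          rw [nuScan_nil, List.append_nil]
          conv_lhs => rw [hcs, splitF_no_slash _ hrunne]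
          simp [nuStepF, nuWrap, PySem.Chars.join_singleton, hc]
        | cons d0 d' =>
          have hdne : (c :: rest).dropWhile (· ≠ '/') ≠ [] := by rw [hd]; simp
          have hd0 : d0 = '/' := by
            have hh := nu_dropWhile_head (fun x => decide (x ≠ '/')) (c :: rest) d0 d' hd
            simpa using hh
          subst hd0
          have hcs : c :: rest = (c :: rest).takeWhile (· ≠ '/') ++ '/' :: d' := by
            conv_lhs => rw [← hsplit]
            rw [hd]
          rw [nuScan_slash]
          conv_lhs => rw [hcs, splitF_pre_slash _ d' hrunne, List.map_cons]
          have hj : PySem.Chars.join ['/']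
                (nuStepF ((c :: rest).takeWhile (· ≠ '/')) :: (splitF d').map nuStepF) =
              nuStepF ((c :: rest).takeWhile (· ≠ '/')) ++ ['/'] ++
                PySem.Chars.join ['/'] ((splitF d').map nuStepF) := by
            obtain ⟨y, t, hyt⟩ := List.exists_cons_of_ne_nil (splitF_ne_nil d')
            rw [hyt, List.map_cons]
            exact PySem.Chars.join_cons_cons _ _ _ _
          have hlen : d'.length ≤ n := by
            have hlcs := congrArg List.length hcs
            have hrl : 1 ≤ ((c :: rest).takeWhile (· ≠ '/')).length := by
              rw [hrun]; simp
            simp [List.length_append] at hlcs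
            simp at h
            omega
          rw [hj, ih d' hlen]
          simp [nuStepF, nuWrap, hc]

-- ===== VERDICT (by name: the statement is the Claim_ definition above) =====
theorem namespace_unaware_spec : Claim_equal_namespace_unaware := by
  intro xpath _
  unfold Spec_namespace_unaware namespace_unaware namespace_unaware_alt
  simp only [PySem.List.foldl_append_singleton_eq_map, List.nil_append]
  rw [splitOn_eq_splitF]
  have hmap : (splitF xpath.toList).map (fun step => if step ≠ [] then nuWrap step else step) =
      (splitF xpath.toList).map nuStepF := rfl
  rw [hmap, nu_main xpath.toList.length xpath.toList (le_refl _)]
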